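-- pv_equiv track=rewrite | github.com/missingthl/MTS-PIA | datasets/seed_raw_cnt.py | _duplicate_indices
-- ===== SOURCE A (Python) =====
-- from typing import Dict, List, Optional, Tuple
--
-- def _duplicate_indices(names: List[str]) -> Dict[str, List[int]]:
--     dupes: Dict[str, List[int]] = {}
--     seen: Dict[str, int] = {}
--     for idx, name in enumerate(names):
--         if name in seen:
--             if name not in dupes:
--                 dupes[name] = [seen[name]]
--             dupes[name].append(idx)
--         else:
--             seen[name] = idx
--     return dupes
-- ===== SOURCE B (Python) =====
-- from typing import Dict, List
--
--
-- def _duplicate_indices(names: List[str]) -> Dict[str, List[int]]: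
--     # Pass 1: first-occurrence index of every name.
--     first: Dict[str, int] = {}
--     for idx, name in enumerate(names):
--         first.setdefault(name, idx)
--     # Pass 2: every non-first occurrence is a duplicate; seed its group with
--     # the first occurrence the moment a second one shows up.
--     dupes: Dict[str, List[int]] = {}
--     for idx, name in enumerate(names):
--         if idx != first[name]:
--             dupes.setdefault(name, [first[name]]).append(idx)
--     return dupes
-- ===== Notes on version B (the rewrite author's own statement) =====
-- stated objective: alternative
-- what changed: B replaces A's fused single pass (a growing 'seen' dict plus conditional promotion into 'dupes') with two separate passes: first precompute each name's first-occurrence index with setdefault, then a filtered pass that appends every index with idx != first[name] via setdefault.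
import Mathlib
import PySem

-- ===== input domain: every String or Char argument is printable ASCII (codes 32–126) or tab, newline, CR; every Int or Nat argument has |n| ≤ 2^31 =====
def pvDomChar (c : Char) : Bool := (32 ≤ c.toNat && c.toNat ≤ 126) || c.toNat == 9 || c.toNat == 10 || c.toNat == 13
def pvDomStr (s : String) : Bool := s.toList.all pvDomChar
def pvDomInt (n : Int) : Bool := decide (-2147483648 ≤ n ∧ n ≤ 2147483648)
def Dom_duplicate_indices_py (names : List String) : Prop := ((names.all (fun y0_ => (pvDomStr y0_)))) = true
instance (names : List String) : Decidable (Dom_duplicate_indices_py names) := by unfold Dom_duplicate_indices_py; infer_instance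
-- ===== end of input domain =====

-- B replaces A's fused seen/dupes single pass by two passes: precompute first-occurrence
-- indices, then collect every later occurrence (alternative decomposition, same cost).


-- ===== PORT A =====
-- one loop step of A: state is (dupes, seen); 'dupes[name].append(idx)' is modify with
-- default [] (the key is always present there, so the default is never used)
def dupStepA (st : PySem.Dict String (List Int) × PySem.Dict String Int)
    (p : Int × String) : PySem.Dict String (List Int) × PySem.Dict String Int :=
  if st.2.contains p.2 then
    let d1 := if st.1.contains p.2 then st.1 else st.1.insert p.2 [st.2.getD p.2 0]
    (d1.modify p.2 [] (· ++ [p.1]), st.2)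
  else
    (st.1, st.2.insert p.2 p.1)

def duplicate_indices_py (names : List String) : List (String × List Int) :=
  (((PySem.List.enumerate names 0).foldl dupStepA
      (PySem.Dict.empty, PySem.Dict.empty)).1).items

-- ===== PORT B =====
-- pass 1 of B: first.setdefault(name, idx)
def firstStepB (f : PySem.Dict String Int) (p : Int × String) : PySem.Dict String Int :=
  f.setdefault p.2 p.1

-- pass 2 of B: 'dupes.setdefault(name, [first[name]]).append(idx)' = setdefault then
-- modify-append ('first[name]' never misses after pass 1, so getD's default is unused)
def dupStepB (first : PySem.Dict String Int) (d : PySem.Dict String (List Int))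
    (p : Int × String) : PySem.Dict String (List Int) :=
  if p.1 ≠ first.getD p.2 0 then
    (d.setdefault p.2 [first.getD p.2 0]).modify p.2 [] (· ++ [p.1])
  else d

def duplicate_indices_py_alt (names : List String) : List (String × List Int) :=
  let first := (PySem.List.enumerate names 0).foldl firstStepB PySem.Dict.empty
  ((PySem.List.enumerate names 0).foldl (dupStepB first) PySem.Dict.empty).items

-- ===== PRECONDITION & SPEC =====
def Spec_duplicate_indices_py (names : List String) (out : List (String × List Int)) : Prop := out = duplicate_indices_py_alt names
instance (names : List String) (out : List (String × List Int)) : Decidable (Spec_duplicate_indices_py names out) := by unfold Spec_duplicate_indices_py; infer_instance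

-- ===== CLAIM (what is proved, stated in full; the proofs are below) =====
def Claim_equal_duplicate_indices_py : Prop := ∀ (names : List String), Dom_duplicate_indices_py names → Spec_duplicate_indices_py names (duplicate_indices_py names)

-- ===== LEMMAS AND PROOFS =====

-- pass 1 of B computes the first-occurrence map
theorem firstMap_get (l : List String) (i : Int) (f : PySem.Dict String Int) (n : String) :
    ((PySem.List.enumerate l i).foldl firstStepB f).get? n =
      match f.get? n with
      | some j => some j
      | none => if n ∈ l then some (i + (l.idxOf n : Int)) else none := by
  induction l generalizing i f with
  | nil => cases h : f.get? n <;> simp [PySem.List.enumerate_nil, h]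
  | cons x xs ih =>
    rw [PySem.List.enumerate_cons]
    simp only [List.foldl_cons]
    by_cases hc : f.contains x
    · rw [show firstStepB f (i, x) = f from PySem.Dict.setdefault_of_contains _ _ hc, ih]
      cases h : f.get? n with
      | some j => rfl
      | none =>
        have hnx : n ≠ x := by
          intro he; subst he
          rw [PySem.Dict.contains_eq_isSome_get?, h] at hc; simp at hc
        by_cases hm : n ∈ xs
        · simp [hm, hnx, List.idxOf_cons_ne _ (Ne.symm hnx), Nat.succ_eq_add_one]
          ring
        · have hnm : n ∉ (x :: xs) := by simp [hnx, hm]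
          simp [hm, hnm]
    · simp only [Bool.not_eq_true] at hc
      rw [show firstStepB f (i, x) = f.insert x i from
        PySem.Dict.setdefault_of_not_contains _ _ hc, ih]
      by_cases hnx : n = x
      · subst hnx
        rw [PySem.Dict.get?_insert_self]
        rw [PySem.Dict.contains_eq_isSome_get?] at hc
        cases h : f.get? n with
        | some j => rw [h] at hc; simp at hc
        | none => simp [List.idxOf_cons_self]
      · rw [PySem.Dict.get?_insert_of_ne _ _ hnx]
        cases h : f.get? n with
        | some j => rfl
        | none =>
          by_cases hm : n ∈ xs
          · simp [hm, hnx, List.idxOf_cons_ne _ (Ne.symm hnx), Nat.succ_eq_add_one]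
            ring
          · have hnm : n ∉ (x :: xs) := by simp [hnx, hm]
            simp [hm, hnm]

-- the loop invariant relating A's 'seen' to B's precomputed 'first'
theorem loop_eq (l : List String) (i : Int) (d : PySem.Dict String (List Int))
    (s : PySem.Dict String Int) (first : PySem.Dict String Int)
    (H1 : ∀ n j, s.get? n = some j → first.get? n = some j ∧ j < i)
    (H2 : ∀ n, n ∈ l → s.get? n = none → first.get? n = some (i + (l.idxOf n : Int))) :
    ((PySem.List.enumerate l i).foldl dupStepA (d, s)).1 =
      (PySem.List.enumerate l i).foldl (dupStepB first) d := by
  induction l generalizing i d s with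
  | nil => simp [PySem.List.enumerate_nil]
  | cons x xs ih =>
    rw [PySem.List.enumerate_cons]
    simp only [List.foldl_cons]
    cases hs : s.get? x with
    | some j =>
      obtain ⟨hf, hlt⟩ := H1 x j hs
      have hcont : s.contains x = true := by
        rw [PySem.Dict.contains_eq_isSome_get?, hs]; rfl
      have hgD : first.getD x 0 = j := PySem.Dict.getD_of_get?_eq_some _ _ hf
      have hsD : s.getD x 0 = j := PySem.Dict.getD_of_get?_eq_some _ _ hs
      have hne : ¬ (i = j) := by omega
      have hA : dupStepA (d, s) (i, x) =
          ((if d.contains x then d else d.insert x [j]).modify x [] (· ++ [i]), s) := by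
        simp [dupStepA, hcont, hsD]
      have hB : dupStepB first d (i, x) =
          (if d.contains x then d else d.insert x [j]).modify x [] (· ++ [i]) := by
        by_cases hc : d.contains x
        · simp [dupStepB, hgD, hne, PySem.Dict.setdefault_of_contains _ _ hc, hc]
        · simp only [Bool.not_eq_true] at hc
          simp [dupStepB, hgD, hne, PySem.Dict.setdefault_of_not_contains _ _ hc, hc]
      rw [hA, hB]
      apply ih (i + 1)
      · intro n k hk
        obtain ⟨h1, h2⟩ := H1 n k hk
        exact ⟨h1, by omega⟩
      · intro n hm hn
        have hnx : n ≠ x := by intro he; subst he; rw [hs] at hn; simp at hn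
        have hh := H2 n (by simp [hm]) hn
        rw [hh, List.idxOf_cons_ne _ (Ne.symm hnx), Nat.succ_eq_add_one]
        congr 1; push_cast; ring
    | none =>
      have hcont : s.contains x = false := by
        rw [PySem.Dict.contains_eq_isSome_get?, hs]; rfl
      have hfx : first.get? x = some i := by
        have hh := H2 x (by simp) hs
        rwa [List.idxOf_cons_self, Int.natCast_zero, add_zero] at hh
      have hgD : first.getD x 0 = i := PySem.Dict.getD_of_get?_eq_some _ _ hfx
      have hA : dupStepA (d, s) (i, x) = (d, s.insert x i) := by
        simp [dupStepA, hcont]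
      have hB : dupStepB first d (i, x) = d := by
        simp [dupStepB, hgD]
      rw [hA, hB]
      apply ih (i + 1)
      · intro n k hk
        by_cases hnx : n = x
        · subst hnx
          rw [PySem.Dict.get?_insert_self] at hk
          cases hk
          exact ⟨hfx, by omega⟩
        · rw [PySem.Dict.get?_insert_of_ne _ _ hnx] at hk
          obtain ⟨h1, h2⟩ := H1 n k hk
          exact ⟨h1, by omega⟩
      · intro n hm hn
        by_cases hnx : n = x
        · subst hnx
          rw [PySem.Dict.get?_insert_self] at hn
          simp at hn
        · rw [PySem.Dict.get?_insert_of_ne _ _ hnx] at hn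
          have hh := H2 n (by simp [hm]) hn
          rw [hh, List.idxOf_cons_ne _ (Ne.symm hnx), Nat.succ_eq_add_one]
          congr 1; push_cast; ring

-- ===== VERDICT (by name: the statement is the Claim_ definition above) =====
theorem duplicate_indices_py_spec : Claim_equal_duplicate_indices_py := by
  intro names _
  unfold Spec_duplicate_indices_py duplicate_indices_py duplicate_indices_py_alt
  congr 1
  apply loop_eq
  · intro n j h
    rw [PySem.Dict.get?_empty] at h
    simp at h
  · intro n hm _
    rw [firstMap_get, PySem.Dict.get?_empty]
    simp [hm]
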